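-- pv_equiv track=rewrite | github.com/SferrellaA/Advent-of-Code | 04/part2.py | check_doubles
-- ===== SOURCE A (Python) =====
-- def check_doubles(number):
--     number = [-1] + number + [-1]
--     for i, j in enumerate(number):
--         try:
--             if number[i] == number[i+1]:
--                 if number[i-1] != number[i]:
--                     if number[i+2] != number[i]:
--                         return True
--         except IndexError:
--             pass
-- ===== SOURCE B (Python) =====
-- def check_doubles(number):
--     i, n = 0, len(number)
--     while i < n:
--         j = i + 1
--         while j < n and number[j] == number[i]:
--             j += 1
--         if j - i == 2:
--             return True
--         i = j
-- ===== Notes on version B (the rewrite author's own statement) =====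
-- stated objective: simpler
-- what changed: Replaces A's sentinel-padded copy, enumerate index walk with negative-index wraparound and try/except IndexError by a direct two-pointer run-length scan of the input that returns True on the first run of length exactly 2.
-- outside the precondition, e.g. on check_doubles([-1, -1]): A returns None, B returns True; on check_doubles([3, -1, -1]): A returns None, B returns True
import Mathlib
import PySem

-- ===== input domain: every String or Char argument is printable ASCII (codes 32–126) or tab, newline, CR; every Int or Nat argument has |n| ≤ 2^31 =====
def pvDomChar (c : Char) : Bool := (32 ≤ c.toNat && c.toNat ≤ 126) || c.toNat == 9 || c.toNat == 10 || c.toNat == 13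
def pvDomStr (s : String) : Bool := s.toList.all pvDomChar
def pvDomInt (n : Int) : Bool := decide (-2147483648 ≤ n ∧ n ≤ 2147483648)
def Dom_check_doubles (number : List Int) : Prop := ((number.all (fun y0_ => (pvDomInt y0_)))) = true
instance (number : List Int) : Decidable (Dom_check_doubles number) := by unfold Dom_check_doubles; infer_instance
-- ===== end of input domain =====

-- B replaces A's sentinel-padding index walk with try/except by a run-length
-- scan over the list itself (objective: simpler). Pre_ restricts to lists without -1,
-- A's sentinel value, which is not a digit and hence outside the function's purpose.


-- ===== PORT A =====
-- the body of the try: number[i]==number[i+1] … ; any IndexError (out-of-range pyGet?) is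
-- caught by the except and yields false ("pass"); negative index -1 wraps as in Python
def firesA (P : List Int) (i : Nat) : Bool :=
  match PySem.List.pyGet? P (i : Int), PySem.List.pyGet? P ((i : Int) + 1) with
  | some a, some b =>
    if a == b then
      match PySem.List.pyGet? P ((i : Int) - 1) with
      | some c =>
        if c != a then
          match PySem.List.pyGet? P ((i : Int) + 2) with
          | some d => d != a
          | none => false
        else false
      | none => false
    else false
  | _, _ => false

-- the for-loop over enumerate(number) with early return True; falls off the end → None
def aloop (P : List Int) (i : Nat) : Option Bool :=
  if _h : i < P.length then
    if firesA P i then some true else aloop P (i + 1)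
  else none
termination_by P.length - i

def check_doubles (number : List Int) : Option Bool :=
  aloop (-1 :: (number ++ [-1])) 0

-- ===== PORT B =====
-- inner while loop: walk past the run of elements equal to the head value v; returns
-- (number of further elements equal to v, remaining suffix)
def runSplit (v : Int) : List Int → Nat × List Int
  | [] => (0, [])
  | x :: xs => if x == v then ((runSplit v xs).1 + 1, (runSplit v xs).2) else (0, x :: xs)

theorem runSplit_snd_length_le (v : Int) (l : List Int) : (runSplit v l).2.length ≤ l.length := by
  induction l with
  | nil => simp [runSplit]
  | cons x xs ih =>
      simp only [runSplit]
      split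
      · exact le_trans ih (by simp)
      · simp

-- outer while loop: peel one run per iteration, return True on a run of length exactly 2
def bloop : List Int → Option Bool
  | [] => none
  | x :: xs =>
    if (runSplit x xs).1 + 1 == 2 then some true
    else bloop (runSplit x xs).2
termination_by l => l.length
decreasing_by
  have := runSplit_snd_length_le x xs
  simp; omega

def check_doubles_alt (number : List Int) : Option Bool := bloop number

-- ===== PRECONDITION & SPEC =====
-- Pre_ excludes lists containing -1 (A's sentinel value, never a digit): there A's padding
-- accidentally merges genuine runs with the sentinels, an artefact outside the function's
-- natural domain of digit lists.
def Pre_check_doubles (number : List Int) : Prop := (-1 : Int) ∉ number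
instance (number : List Int) : Decidable (Pre_check_doubles number) := by
  unfold Pre_check_doubles; infer_instance

def pvWitness_check_doubles : List Int := [1, 2, 2, 3]

def Spec_check_doubles (number : List Int) (out : Option Bool) : Prop := out = check_doubles_alt number
instance (number : List Int) (out : Option Bool) : Decidable (Spec_check_doubles number out) := by unfold Spec_check_doubles; infer_instance

-- ===== CLAIM (what is proved, stated in full; the proofs are below) =====
def Claim_equal_check_doubles : Prop := ∀ (number : List Int), Dom_check_doubles number → Pre_check_doubles number → Spec_check_doubles number (check_doubles number)

-- ===== LEMMAS AND PROOFS =====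

-- firesA P i for i ≥ 1 only looks at the four entries P[i-1..i+2]
def firesL : List Int → Bool
  | c :: a :: b :: d :: _ => a == b && c != a && d != a
  | _ => false

-- proof-side rephrasing of A's loop as a structural scan over suffixes
def dloop : List Int → Option Bool
  | [] => none
  | c :: t => if firesL (c :: t) then some true else dloop t

theorem firesA_one (P : List Int) : firesA P 1 = firesL P := by
  match P with
  | [] => decide
  | [c] => simp [firesA, firesL, PySem.List.pyGet?, PySem.List.pyIdx?]
  | [c, a] => simp [firesA, firesL, PySem.List.pyGet?, PySem.List.pyIdx?]
  | [c, a, b] => simp [firesA, firesL, PySem.List.pyGet?, PySem.List.pyIdx?]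
  | c :: a :: b :: d :: t =>
      have h1 : ((1 : Nat) : Int) + 1 = ((2 : Nat) : Int) := by norm_num
      have h2 : ((1 : Nat) : Int) - 1 = ((0 : Nat) : Int) := by norm_num
      have h3 : ((1 : Nat) : Int) + 2 = ((3 : Nat) : Int) := by norm_num
      simp only [firesA, h1, h2, h3, PySem.List.pyGet?_natCast,
        List.getElem?_cons_zero, List.getElem?_cons_succ, firesL]
      by_cases hab : a = b <;> by_cases hca : c = a <;> by_cases hda : d = a <;>
        simp [hab, hca, hda, bne, Bool.beq_eq_decide_eq]

theorem firesA_tail (P : List Int) (x : Int) (i : Nat) (hi : 1 ≤ i) :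
    firesA (x :: P) (i + 1) = firesA P i := by
  have key : ∀ k : Int, 0 ≤ k →
      PySem.List.pyGet? (x :: P) (k + 1) = PySem.List.pyGet? P k := by
    intro k hk
    obtain ⟨n, rfl⟩ := Int.eq_ofNat_of_zero_le hk
    have : ((n : Int) + 1) = ((n + 1 : Nat) : Int) := by push_cast; ring
    rw [this]
    simp
  simp only [firesA, Nat.cast_add, Nat.cast_one]
  have e3 : (i : Int) + 1 - 1 = ((i : Int) - 1) + 1 := by ring
  have e4 : (i : Int) + 1 + 2 = ((i : Int) + 2) + 1 := by ring
  rw [e3, e4, key (i : Int) (by positivity),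
      key ((i : Int) + 1) (by positivity),
      key ((i : Int) - 1) (by omega),
      key ((i : Int) + 2) (by positivity)]

theorem firesA_drop (P : List Int) (i : Nat) (hi : 1 ≤ i) :
    firesA P i = firesL (P.drop (i - 1)) := by
  induction i generalizing P with
  | zero => omega
  | succ n ih =>
    cases Nat.eq_or_lt_of_le hi with
    | inl h =>
      have : n = 0 := by omega
      subst this
      simpa using firesA_one P
    | inr h =>
      have hn : 1 ≤ n := by omega
      cases P with
      | nil =>
        have h0 : firesA ([] : List Int) (n + 1) = false := by
          simp [firesA, PySem.List.pyGet?, PySem.List.pyIdx?]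
        rw [h0]; simp [firesL]
      | cons x t =>
        rw [firesA_tail t x n hn, ih t hn]
        obtain ⟨m, rfl⟩ : ∃ m, n = m + 1 := ⟨n - 1, by omega⟩
        simp

theorem aloop_eq_dloop (P : List Int) (i : Nat) (hi : 1 ≤ i) :
    aloop P i = dloop (P.drop (i - 1)) := by
  by_cases h : i < P.length
  · have hne : P.drop (i - 1) ≠ [] := by
      simp [List.drop_eq_nil_iff]; omega
    obtain ⟨c, t, ht⟩ := List.exists_cons_of_ne_nil hne
    have htail : P.drop i = t := by
      have h1 : P.drop i = (P.drop (i - 1)).tail := by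
        rw [List.tail_drop]
        congr 1
        omega
      rw [h1, ht]; rfl
    rw [aloop]
    simp only [h, dif_pos]
    rw [firesA_drop P i hi, ht]
    by_cases hf : firesL (c :: t)
    · simp [dloop, hf]
    · rw [dloop]
      simp only [hf, Bool.false_eq_true, if_false]
      have hrec := aloop_eq_dloop P (i + 1) (by omega)
      rw [hrec, Nat.add_sub_cancel, htail]
  · rw [aloop]
    simp only [h, dif_neg, not_false_iff]
    have hlen : (P.drop (i - 1)).length ≤ 1 := by
      simp; omega
    match hdl : P.drop (i - 1) with
    | [] => simp [dloop]
    | [c] => simp [dloop, firesL]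
    | c :: a :: t => rw [hdl] at hlen; simp at hlen
termination_by P.length - i

theorem firesA_zero (xs : List Int) : firesA (-1 :: (xs ++ [-1])) 0 = false := by
  have hlast : PySem.List.pyGet? (-1 :: (xs ++ [-1])) (-1) = some (-1) := by
    have h1 : (-1 : Int) :: (xs ++ [-1]) = ((-1 :: xs) ++ [-1]) := by simp
    rw [h1, PySem.List.pyGet?_neg_one_append_singleton]
  simp only [firesA]
  have h0 : PySem.List.pyGet? (-1 :: (xs ++ [-1])) ((0 : Nat) : Int) = some (-1) := by simp
  have e : ((0 : Nat) : Int) - 1 = (-1 : Int) := by norm_num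
  rw [h0, e, hlast]
  cases hx : PySem.List.pyGet? (-1 :: (xs ++ [-1])) (((0 : Nat) : Int) + 1) with
  | none => rfl
  | some b =>
    by_cases hb : (-1 : Int) = b <;> simp [hb]

theorem runSplit_spec (v : Int) (l : List Int) :
    l = List.replicate (runSplit v l).1 v ++ (runSplit v l).2 ∧
    (∀ y, ((runSplit v l).2).head? = some y → y ≠ v) := by
  induction l with
  | nil => simp [runSplit]
  | cons x xs ih =>
    simp only [runSplit]
    by_cases hx : x = v
    · simp only [hx, beq_self_eq_true, if_true]
      refine ⟨?_, ih.2⟩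
      conv_lhs => rw [ih.1]
      simp [List.replicate_succ]
    · simp only [beq_iff_eq, hx, if_false]
      exact ⟨by simp, by intro y hy; simp at hy; omega⟩

-- run-peeling through the interior of a run of length ≥ 2 (seen from its second element)
theorem dloop_run (x : Int) (k : Nat) (rest : List Int)
    (hrest : ∀ y, rest.head? = some y → y ≠ x) :
    dloop (x :: x :: (List.replicate k x ++ rest ++ [-1])) = dloop (x :: (rest ++ [-1])) := by
  induction k with
  | zero =>
    simp only [List.replicate, List.nil_append]
    rw [dloop]
    have hff : firesL (x :: x :: (rest ++ [-1])) = false := by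
      match rest with
      | [] => simp [firesL]
      | r :: rs =>
        match rs with
        | [] => simp [firesL]
        | s :: ss => simp [firesL]
    simp [hff]
  | succ n ih =>
    obtain ⟨d, t2, hd⟩ : ∃ d t2, List.replicate n x ++ rest ++ [-1] = d :: t2 := by
      cases h' : List.replicate n x ++ rest ++ [-1] with
      | nil => exact absurd (congrArg List.length h') (by simp)
      | cons d t2 => exact ⟨d, t2, rfl⟩
    have hff : firesL (x :: x :: (List.replicate (n + 1) x ++ rest ++ [-1])) = false := by
      rw [List.replicate_succ, List.cons_append, List.cons_append, hd]
      simp [firesL, bne]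
    rw [dloop]
    simp only [hff, Bool.false_eq_true, if_false]
    rw [List.replicate_succ, List.cons_append, List.cons_append]
    exact ih

-- the core equivalence: scanning with previous value c (≠ head) equals B's run peeling
theorem dloop_eq_bloop (xs : List Int) (hm : (-1 : Int) ∉ xs) (c : Int)
    (hc : ∀ y, xs.head? = some y → c ≠ y) :
    dloop (c :: (xs ++ [-1])) = bloop xs := by
  match xs with
  | [] =>
    simp [dloop, firesL, bloop]
  | x :: t =>
    have hx1 : x ≠ -1 := by intro h; exact hm (by simp [h])
    have hcx : c ≠ x := hc x rfl
    obtain ⟨hdec, hhd⟩ := runSplit_spec x t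
    set k := (runSplit x t).1 with hk
    set rest := (runSplit x t).2 with hr
    have htlen : rest.length ≤ t.length := runSplit_snd_length_le x t
    have hmrest : (-1 : Int) ∉ rest := by
      intro hmem
      apply hm
      rw [hdec]
      simp
      right; right; exact hmem
    match hkc : k with
    | 0 =>
      -- run of length 1
      have ht : t = rest := by rw [hdec]; simp
      rw [dloop]
      have hfl : firesL (c :: x :: (t ++ [-1])) = false := by
        match ht2 : t with
        | [] => simp [firesL]
        | r :: rs =>
          have hrx : r ≠ x := hhd r (by rw [← ht]; simp)
          have hxr : x ≠ r := Ne.symm hrx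
          match rs with
          | [] => simp [firesL, hxr]
          | s :: ss => simp [firesL, hxr]
      simp only [List.cons_append, hfl, Bool.false_eq_true, if_false]
      rw [dloop_eq_bloop t (fun h => hm (List.mem_cons_of_mem x h)) x
            (by intro y hy; rw [ht] at hy; exact (hhd y hy).symm)]
      rw [bloop, ← hk, ← hr, ht]
      simp
    | 1 =>
      -- run of length exactly 2: fires
      have ht : t = x :: rest := by rw [hdec]; simp
      rw [dloop]
      have hfl : firesL (c :: x :: (t ++ [-1])) = true := by
        rw [ht]
        have h1x : (-1 : Int) ≠ x := Ne.symm hx1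
        match hr2 : rest with
        | [] => simp [firesL, bne, hcx, h1x]
        | r :: rs =>
          have hrx : r ≠ x := hhd r rfl
          simp [firesL, bne, hcx, hrx]
      simp only [List.cons_append, hfl, if_true]
      rw [bloop, ← hk]
      simp
    | Nat.succ (Nat.succ m) =>
      -- run of length ≥ 3
      have ht : t = x :: x :: (List.replicate m x ++ rest) := by
        rw [hdec]; simp [List.replicate_succ]
      rw [dloop]
      have hfl : firesL (c :: x :: (t ++ [-1])) = false := by
        rw [ht]; simp [firesL, bne]
      simp only [List.cons_append, hfl, Bool.false_eq_true, if_false]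
      rw [show (x :: (t ++ [-1]) : List Int)
            = x :: x :: (List.replicate (m + 1) x ++ rest ++ [-1]) by
          rw [ht]; simp [List.replicate_succ]]
      rw [dloop_run x (m + 1) rest (fun y hy => hhd y hy)]
      rw [dloop_eq_bloop rest hmrest x (fun y hy => (hhd y hy).symm)]
      have hne : ((runSplit x t).1 + 1 == 2) = false := by
        rw [← hk]; simp
      rw [bloop, hne, ← hr]
      simp
termination_by xs.length
decreasing_by
  · simp
  · simp; omega

-- ===== VERDICT (by name: the statement is the Claim_ definition above) =====
theorem check_doubles_spec : Claim_equal_check_doubles := by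
  intro number _hdom hpre
  unfold Spec_check_doubles check_doubles check_doubles_alt
  have hlen : 0 < ((-1 : Int) :: (number ++ [-1])).length := by simp
  rw [aloop]
  simp only [hlen, dif_pos]
  rw [firesA_zero number]
  simp only [Bool.false_eq_true, if_false]
  rw [aloop_eq_dloop _ 1 (le_refl 1)]
  simp only [Nat.sub_self, List.drop_zero]
  exact dloop_eq_bloop number hpre (-1) (fun y hy h => by
    exact hpre (by rw [h]; exact List.mem_of_mem_head? hy))
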